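-- pv_equiv track=rewrite | github.com/dobermanch/dev-quests | src/python/challenges/problems/determine_if_two_strings_are_close_test.py | Solution
-- ===== SOURCE A (Python) =====
-- import collections
--
-- def Solution(word1: str, word2: str) -> bool:
--     if len(word1) != len(word2):
--         return False
--
--     map1 = collections.Counter(word1)
--     map2 = collections.Counter(word2)
--
--     if len(map1) != len(map2):
--         return False
--
--     for key in map1.keys():
--         if key not in map2:
--             return False
--
--     occ1 = sorted(map1.values())
--     occ2 = sorted(map2.values())
--
--     return occ1 == occ2
-- ===== SOURCE B (Python) =====
-- def _runs(s):
--     # run-length encode a sorted list: distinct chars in order + run lengths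
--     chars = []
--     lens = []
--     i = 0
--     n = len(s)
--     while i < n:
--         j = i + 1
--         while j < n and s[j] == s[i]:
--             j += 1
--         chars.append(s[i])
--         lens.append(j - i)
--         i = j
--     return chars, lens
--
-- def Solution(word1: str, word2: str) -> bool:
--     chars1, lens1 = _runs(sorted(word1))
--     chars2, lens2 = _runs(sorted(word2))
--     return chars1 == chars2 and sorted(lens1) == sorted(lens2)
-- ===== Notes on version B (the rewrite author's own statement) =====
-- stated objective: alternative
-- what changed: Replaces A's hash-counting (two Counters, a key-membership loop, sorted value lists) with a sort-then-scan algorithm: sort each word, run-length encode the sorted characters in one linear scan, then compare the distinct-character lists and the sorted run-length multisets; no Counter or dict is used at all.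
import Mathlib
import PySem

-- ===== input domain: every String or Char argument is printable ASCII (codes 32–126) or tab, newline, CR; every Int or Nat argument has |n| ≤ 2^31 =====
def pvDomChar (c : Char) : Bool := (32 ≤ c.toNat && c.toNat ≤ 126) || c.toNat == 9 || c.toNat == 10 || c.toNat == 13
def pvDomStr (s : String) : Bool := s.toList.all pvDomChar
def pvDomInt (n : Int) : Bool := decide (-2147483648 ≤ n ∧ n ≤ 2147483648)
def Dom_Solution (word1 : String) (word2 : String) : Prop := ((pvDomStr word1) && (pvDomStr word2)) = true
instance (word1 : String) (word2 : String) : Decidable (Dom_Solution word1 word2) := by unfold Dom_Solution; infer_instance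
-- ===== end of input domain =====

-- B replaces A's hash-counting (two Counters, a key-membership loop, sorted value lists) with
-- sort-then-scan: sort each word, run-length encode it in one pass, compare the distinct-char
-- lists and the sorted run-length multisets (no Counter/dict at all).

-- ===== PORT A =====
def Solution (word1 : String) (word2 : String) : Bool :=
  if word1.toList.length ≠ word2.toList.length then false
  else
    let map1 := PySem.Dict.counter word1.toList
    let map2 := PySem.Dict.counter word2.toList
    if map1.size ≠ map2.size then false
    -- 'for key in map1.keys(): if key not in map2: return False'
    else if map1.keys.any (fun k => !(map2.contains k)) then false
    else
      let occ1 := PySem.List.sorted map1.values (fun v => v) false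
      let occ2 := PySem.List.sorted map2.values (fun v => v) false
      occ1 == occ2

-- ===== PORT B =====
-- _runs: the inner 'while j < n and s[j] == s[i]' walks past the current run
-- (= takeWhile/dropWhile on the tail); the outer while is the recursion on what remains.
def runsAux : List Char → List Char × List Int
  | [] => ([], [])
  | c :: rest =>
      let t := rest.takeWhile (fun x => x == c)
      let d := rest.dropWhile (fun x => x == c)
      let p := runsAux d
      (c :: p.1, ((1 : Int) + t.length) :: p.2)
termination_by s => s.length
decreasing_by
  simp only [List.length_cons]
  exact Nat.lt_succ_of_le (List.length_dropWhile_le (fun x => x == c) rest)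

def Solution_alt (word1 : String) (word2 : String) : Bool :=
  let r1 := runsAux (PySem.List.sorted word1.toList (fun x => x) false)
  let r2 := runsAux (PySem.List.sorted word2.toList (fun x => x) false)
  r1.1 == r2.1 &&
    PySem.List.sorted r1.2 (fun v => v) false == PySem.List.sorted r2.2 (fun v => v) false

-- ===== PRECONDITION & SPEC =====
def Spec_Solution (word1 : String) (word2 : String) (out : Bool) : Prop := out = Solution_alt word1 word2
instance (word1 : String) (word2 : String) (out : Bool) : Decidable (Spec_Solution word1 word2 out) := by unfold Spec_Solution; infer_instance

-- ===== CLAIM (what is proved, stated in full; the proofs are below) =====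
def Claim_equal_Solution : Prop := ∀ (word1 : String) (word2 : String), Dom_Solution word1 word2 → Spec_Solution word1 word2 (Solution word1 word2)

-- ===== LEMMAS AND PROOFS =====

lemma runsAux_cons (c : Char) (rest : List Char) :
    runsAux (c :: rest) =
      (c :: (runsAux (rest.dropWhile (fun x => x == c))).1,
       ((1 : Int) + (rest.takeWhile (fun x => x == c)).length)
         :: (runsAux (rest.dropWhile (fun x => x == c))).2) := by
  rw [runsAux]

-- run-length encoding of a (≤)-sorted list: strictly increasing distinct chars,
-- same membership, and the run lengths are the counts at those chars.
lemma runsAux_spec (s : List Char) (hs : s.Pairwise (· ≤ ·)) :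
    (runsAux s).1.Pairwise (· < ·) ∧
    (∀ c, c ∈ (runsAux s).1 ↔ c ∈ s) ∧
    (runsAux s).2 = (runsAux s).1.map (fun c => (s.count c : Int)) := by
  induction s using runsAux.induct with
  | case1 => simp [runsAux]
  | case2 c rest dvar ih =>
    rw [List.pairwise_cons] at hs
    obtain ⟨hcle, hrest⟩ := hs
    have hdv : dvar = rest.dropWhile (fun x => x == c) := rfl
    clear_value dvar
    subst hdv
    set t := rest.takeWhile (fun x => x == c) with ht
    set d := rest.dropWhile (fun x => x == c) with hd
    have hsplit : t ++ d = rest := List.takeWhile_append_dropWhile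
    have htc : ∀ x ∈ t, x = c := fun x hx => by
      simpa using List.mem_takeWhile_imp hx
    have hdsorted : d.Pairwise (· ≤ ·) := hrest.sublist (List.dropWhile_sublist _)
    have hclt : ∀ x ∈ d, c < x := by
      intro x hx
      rcases hde : d with _ | ⟨h, d'⟩
      · simp [hde] at hx
      · have hh : ¬ (h == c) = true := by
          have := List.head_dropWhile_not (p := fun x => x == c) (l := rest)
            (by rw [← hd, hde]; simp)
          simpa [← hd, hde] using this
        have hhne : h ≠ c := by simpa using hh
        have hhmem : h ∈ rest := by rw [← hsplit, hde]; simp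
        have hch : c < h := lt_of_le_of_ne (hcle h hhmem) (Ne.symm hhne)
        rw [hde] at hx
        rcases List.mem_cons.1 hx with rfl | hx'
        · exact hch
        · have : h ≤ x := by
            rw [hde, List.pairwise_cons] at hdsorted
            exact hdsorted.1 x hx'
          exact lt_of_lt_of_le hch this
    have hcnotd : c ∉ d := fun hmem => lt_irrefl c (hclt c hmem)
    obtain ⟨ih1, ih2, ih3⟩ := ih hdsorted
    have hcount_c : ((c :: rest).count c : Int) = 1 + t.length := by
      rw [List.count_cons_self, ← hsplit, List.count_append]
      rw [List.count_eq_length.2 (fun b hb => (htc b hb).symm),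
        List.count_eq_zero.2 hcnotd]
      push_cast; ring
    have hcount_mem : ∀ x ∈ (runsAux d).1, (c :: rest).count x = d.count x := by
      intro x hx
      have hxd : x ∈ d := (ih2 x).1 hx
      have hxc : x ≠ c := fun h => by subst h; exact hcnotd hxd
      have hxt : x ∉ t := fun h => hxc (htc x h)
      rw [← hsplit]
      simp [List.count_append, Ne.symm hxc, List.count_eq_zero.2 hxt]
    rw [runsAux_cons, ← ht, ← hd]
    refine ⟨?_, ?_, ?_⟩
    · exact List.pairwise_cons.2 ⟨fun x hx => hclt x ((ih2 x).1 hx), ih1⟩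
    · intro x
      simp only [List.mem_cons, ih2, ← hsplit, List.mem_append]
      constructor
      · rintro (rfl | h); · left; rfl
        · right; right; exact h
      · rintro (rfl | h | h)
        · left; rfl
        · left; exact htc x h
        · right; exact h
    · rw [List.map_cons, ← hcount_c, ih3]
      dsimp only
      congr 1
      apply List.map_congr_left
      intro x hx
      rw [hcount_mem x hx]

lemma values_counter (l : List Char) :
    (PySem.Dict.counter l).values = (PySem.Set.ofList l).map (fun k => (l.count k : Int)) := by
  simp [PySem.Dict.values, PySem.Dict.items_counter, List.map_map, Function.comp]

lemma sum_values_counter (l : List Char) :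
    (PySem.Dict.counter l).values.sum = (l.length : Int) := by
  rw [values_counter]
  have hperm : (PySem.Set.ofList l).Perm l.dedup :=
    (List.perm_ext_iff_of_nodup (PySem.Set.nodup_ofList l) l.nodup_dedup).2
      (by intro a; simp [PySem.Set.mem_ofList, List.mem_dedup])
  have h1 : ((PySem.Set.ofList l).map (fun k => (l.count k : Int))).sum
      = (l.dedup.map (fun k => (l.count k : Int))).sum := (hperm.map _).sum_eq
  have h2 : (l.dedup.map (fun k => (l.count k : Int))).sum
      = ((l.dedup.map (fun k => l.count k)).sum : Int) := by
    push_cast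
    rw [List.map_map]
    rfl
  rw [h1, h2, List.sum_map_count_dedup_eq_length]

-- A returns true iff the words use the same characters and have the same count multiset.
lemma solutionA_iff (word1 word2 : String) :
    Solution word1 word2 = true ↔
      (∀ x, x ∈ word1.toList ↔ x ∈ word2.toList) ∧
      (PySem.Dict.counter word1.toList).values.Perm (PySem.Dict.counter word2.toList).values := by
  have hA : Solution word1 word2 = true ↔
      word1.toList.length = word2.toList.length ∧
      (PySem.Dict.counter word1.toList).size = (PySem.Dict.counter word2.toList).size ∧
      (∀ k ∈ (PySem.Dict.counter word1.toList).keys,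
        (PySem.Dict.counter word2.toList).contains k = true) ∧
      (PySem.Dict.counter word1.toList).values.Perm (PySem.Dict.counter word2.toList).values := by
    simp only [Solution, ite_not]
    split_ifs with h1 h2 h3
    · simp only [false_iff]
      rintro ⟨-, -, hall, -⟩
      rw [List.any_eq_true] at h3
      obtain ⟨k, hk, hnk⟩ := h3
      simp [hall k hk] at hnk
    · simp only [beq_iff_eq, PySem.List.sorted_id_eq_sorted_id_iff_perm]
      rw [Bool.not_eq_true, List.any_eq_false] at h3
      constructor
      · intro hp
        exact ⟨h1, h2, fun k hk => by simpa using h3 k hk, hp⟩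
      · exact fun h => h.2.2.2
    · simp only [false_iff]; rintro ⟨-, h, -⟩; exact h2 h
    · simp only [false_iff]; rintro ⟨h, -⟩; exact h1 h
  rw [hA]
  have hnod1 := PySem.Set.nodup_ofList word1.toList
  have hnod2 := PySem.Set.nodup_ofList word2.toList
  have hkeys1 : (PySem.Dict.counter word1.toList).keys = PySem.Set.ofList word1.toList :=
    PySem.Dict.keys_counter _
  have hkeys2 : (PySem.Dict.counter word2.toList).keys = PySem.Set.ofList word2.toList :=
    PySem.Dict.keys_counter _
  have hsize : ∀ (d : PySem.Dict Char Int), d.size = d.keys.length := by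
    intro d; simp [PySem.Dict.size, PySem.Dict.keys]
  constructor
  · rintro ⟨hlen, hsz, hsub, hvals⟩
    refine ⟨?_, hvals⟩
    have hsubset : PySem.Set.ofList word1.toList ⊆ PySem.Set.ofList word2.toList := by
      intro x hx
      have := hsub x (by rw [hkeys1]; exact hx)
      rw [PySem.Dict.contains_counter] at this
      simp only [PySem.Set.mem_ofList]
      simpa using this
    have hsp : List.Subperm (PySem.Set.ofList word1.toList) (PySem.Set.ofList word2.toList) :=
      hnod1.subperm hsubset
    have hlen' : (PySem.Set.ofList word1.toList).length = (PySem.Set.ofList word2.toList).length := by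
      rw [← hkeys1, ← hkeys2, ← hsize, ← hsize]; exact hsz
    obtain ⟨l, hp, hs⟩ := hsp
    have hleq : l.length = (PySem.Set.ofList word2.toList).length := by
      rw [← hlen', hp.length_eq]
    rw [hs.eq_of_length hleq] at hp
    intro x
    rw [← PySem.Set.mem_ofList (xs := word1.toList), ← PySem.Set.mem_ofList (xs := word2.toList)]
    exact hp.symm.mem_iff
  · rintro ⟨hmem, hvals⟩
    have hkperm : (PySem.Set.ofList word1.toList).Perm (PySem.Set.ofList word2.toList) :=
      (List.perm_ext_iff_of_nodup hnod1 hnod2).2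
        (by intro a; simp [PySem.Set.mem_ofList, hmem a])
    refine ⟨?_, ?_, ?_, hvals⟩
    · have hsum := hvals.sum_eq
      rw [sum_values_counter, sum_values_counter] at hsum
      exact_mod_cast hsum
    · rw [hsize, hsize, hkeys1, hkeys2]; exact hkperm.length_eq
    · intro k hk
      rw [hkeys1] at hk
      rw [PySem.Dict.contains_counter]
      simp only [PySem.Set.mem_ofList] at hk
      simp [hmem k |>.1 hk]

-- the run lengths of the sorted word are a permutation of the Counter's values
lemma lens_perm_values (l : List Char) :
    (runsAux (PySem.List.sorted l (fun x => x) false)).2.Perm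
      ((PySem.Dict.counter l).values) := by
  set s := PySem.List.sorted l (fun x => x) false with hsdef
  have hsp : s.Perm l := PySem.List.sorted_perm l (fun x => x) false
  obtain ⟨h1, h2, h3⟩ := runsAux_spec s (by
    simpa using PySem.List.sorted_pairwise (xs := l) (key := fun x => x))
  rw [h3, values_counter]
  have hcnt : ∀ x, s.count x = l.count x := fun x => hsp.count_eq x
  have hcharperm : (runsAux s).1.Perm (PySem.Set.ofList l) := by
    refine (List.perm_ext_iff_of_nodup (h1.imp fun h => ne_of_lt h)
      (PySem.Set.nodup_ofList l)).2 ?_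
    intro a
    rw [h2, PySem.Set.mem_ofList, hsp.mem_iff]
  have hmapeq : (runsAux s).1.map (fun c => (s.count c : Int))
      = (runsAux s).1.map (fun c => (l.count c : Int)) :=
    List.map_congr_left (fun a _ => by rw [hcnt a])
  rw [hmapeq]
  exact hcharperm.map _

-- equality of the distinct-char lists of the sorted words ⟺ same character sets
lemma chars_eq_iff (w1 w2 : List Char) :
    (runsAux (PySem.List.sorted w1 (fun x => x) false)).1
      = (runsAux (PySem.List.sorted w2 (fun x => x) false)).1 ↔
    (∀ x, x ∈ w1 ↔ x ∈ w2) := by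
  set s1 := PySem.List.sorted w1 (fun x => x) false
  set s2 := PySem.List.sorted w2 (fun x => x) false
  obtain ⟨a1, b1, -⟩ := runsAux_spec s1 (by
    simpa using PySem.List.sorted_pairwise (xs := w1) (key := fun x => x))
  obtain ⟨a2, b2, -⟩ := runsAux_spec s2 (by
    simpa using PySem.List.sorted_pairwise (xs := w2) (key := fun x => x))
  have hm1 : ∀ x, x ∈ (runsAux s1).1 ↔ x ∈ w1 := fun x =>
    (b1 x).trans ((PySem.List.sorted_perm w1 (fun x => x) false).mem_iff)
  have hm2 : ∀ x, x ∈ (runsAux s2).1 ↔ x ∈ w2 := fun x =>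
    (b2 x).trans ((PySem.List.sorted_perm w2 (fun x => x) false).mem_iff)
  constructor
  · intro heq x
    rw [← hm1 x, ← hm2 x, heq]
  · intro hmem
    have hperm : (runsAux s1).1.Perm (runsAux s2).1 := by
      refine (List.perm_ext_iff_of_nodup (a1.imp fun h => ne_of_lt h)
        (a2.imp fun h => ne_of_lt h)).2 ?_
      intro a
      rw [hm1 a, hm2 a, hmem a]
    have e1 : PySem.List.sorted (runsAux s2).1 (fun x => x) false = (runsAux s1).1 :=
      PySem.List.sorted_eq_of_perm_of_pairwise_lt _ _ _ hperm (by simpa using a1)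
    have e2 : PySem.List.sorted (runsAux s2).1 (fun x => x) false = (runsAux s2).1 :=
      PySem.List.sorted_eq_of_perm_of_pairwise_lt _ _ _ (List.Perm.refl _) (by simpa using a2)
    rw [← e1, e2]

lemma solution_eq_iff (word1 word2 : String) :
    Solution word1 word2 = Solution_alt word1 word2 := by
  rw [Bool.eq_iff_iff, solutionA_iff]
  have hB : Solution_alt word1 word2 = true ↔
      ((runsAux (PySem.List.sorted word1.toList (fun x => x) false)).1
        = (runsAux (PySem.List.sorted word2.toList (fun x => x) false)).1) ∧
      (runsAux (PySem.List.sorted word1.toList (fun x => x) false)).2.Perm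
        (runsAux (PySem.List.sorted word2.toList (fun x => x) false)).2 := by
    simp only [Solution_alt, Bool.and_eq_true, beq_iff_eq,
      PySem.List.sorted_id_eq_sorted_id_iff_perm]
  rw [hB, chars_eq_iff]
  have p1 := lens_perm_values word1.toList
  have p2 := lens_perm_values word2.toList
  constructor
  · rintro ⟨hm, hp⟩
    exact ⟨hm, (p1.trans hp).trans p2.symm⟩
  · rintro ⟨hm, hp⟩
    exact ⟨hm, (p1.symm.trans hp).trans p2⟩

-- ===== VERDICT (by name: the statement is the Claim_ definition above) =====
theorem Solution_spec : Claim_equal_Solution := by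
  intro w1 w2 _
  unfold Spec_Solution
  exact solution_eq_iff w1 w2
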